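-- pv_equiv track=rewrite | github.com/jonberge1337/codigo-hamming | corregir_hamming.py | array_general
-- ===== SOURCE A (Python) =====
-- def potencia(numero):
--     """
--     calcular si es potencia de 2 o no
--     >>> potencia(8)
--     True
--     >>> potencia(7)
--     False
--     """
--     while numero > 1:
--         numero /= 2
--     return numero == 1
--
-- def array_pos(lista, salto):
--     """
--     creamos un array dependiendo del salto que tiene que hacer
--     >>> array_pos(["0", "0", "0", "0", "1", "1", "0", "0", "0", "0", "0"], 1)
--     ["0", "?", "0", "?", "1", "?", "0", "?", "0", "?", "0"]
--     """
--     tamaino = len(lista)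
--     lista_temporal = []
--
--     # recortamos la cadena para que empiece en ese elemento
--     lista = lista[salto-1:]
--
--     # añadimos una variable apoyo para conservar todas las posiciones
--     vacios = "?" * (salto-1)
--     lista_temporal += vacios
--
--     vacios = "?" * salto
--     nsalto = salto * 2
--     while len(lista) > 0:
--         # tomamos los elementos segun la paridad
--         lista_temporal += lista[:salto]
--         lista_temporal += vacios
--
--         # quitamos la informacion copiada mas la vacia
--         lista = lista[nsalto:]
--
--     # recortamos la lista al tamaño de la lista original
--     # para no tener ? de sobra
--     lista_temporal = lista_temporal[:tamaino]
--
--     return lista_temporal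
--
-- def array_general(lista):
--     """
--     creamos el array general para despues corregir
--     >>> array_general(["0", "0", "0", "0", "1", "1", "0", "0", "0", "0", "0"])
--     [
--         ["0", "0", "0", "0", "1", "1", "0", "0", "0", "0", "0"]
--         ["0", "?", "0", "?", "1", "?", "0", "?", "0", "?", "0"]
--         ["?", "0", "0", "?", "?", "1", "0", "?", "?", "0", "0"]
--         ["?", "?", "?", "0", "1", "1", "0", "?", "?", "?", "?"]
--         ["?", "?", "?", "?", "?", "?", "?", "0", "0", "0", "0"]
--     ]
--     """
--     general = []
--     tamaino = len(lista)
--     general.append(lista[:])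
--     for i in range(1, tamaino):
--         if potencia(i):
--             general.append(array_pos(lista, i))
--
--     return general
-- ===== SOURCE B (Python) =====
-- def array_general(lista):
--     """Build the Hamming parity-mask rows with a direct bit test (i+1)&s
--     instead of block slicing, doubling s instead of testing every index."""
--     n = len(lista)
--     general = [lista[:]]
--     s = 1
--     while s < n:
--         general.append([x if (i + 1) & s else "?" for i, x in enumerate(lista)])
--         s *= 2
--     return general
-- ===== Notes on version B (the rewrite author's own statement) =====
-- stated objective: faster
-- what changed: Rows are built in one pass with a direct bit test (i+1)&s on the position (s doubling from 1), replacing A's per-index power-of-two float-halving test and array_pos's block-slice construction, whose repeated 'lista = lista[nsalto:]' re-slicing is quadratic.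
import Mathlib
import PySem

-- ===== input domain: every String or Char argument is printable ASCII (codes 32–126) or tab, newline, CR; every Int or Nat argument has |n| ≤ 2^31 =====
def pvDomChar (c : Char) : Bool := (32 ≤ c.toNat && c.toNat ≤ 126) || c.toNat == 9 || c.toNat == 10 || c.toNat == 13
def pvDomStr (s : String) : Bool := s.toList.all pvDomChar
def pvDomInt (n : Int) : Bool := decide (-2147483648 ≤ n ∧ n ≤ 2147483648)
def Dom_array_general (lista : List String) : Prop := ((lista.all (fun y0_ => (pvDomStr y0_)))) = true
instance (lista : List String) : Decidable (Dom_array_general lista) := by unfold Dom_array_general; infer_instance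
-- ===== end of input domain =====

-- B replaces A's block-slicing row construction and per-index power-of-two test
-- by a single-pass bit test (i+1)&s with the step s doubling — objective: simpler.


-- ===== PORT A =====
-- Python's 'numero /= 2' is float division; on the ints A feeds it (and their
-- halvings, whose denominators are powers of two) it is exact, so it is ported
-- exactly over ℚ.  The while loop is fuel-bounded; fuel numero.natAbs covers
-- every call A makes (log2(numero) halvings at most).
def potenciaLoop (q : ℚ) : Nat → ℚ
  | 0 => q
  | f + 1 => if q > 1 then potenciaLoop (q / 2) f else q

def potencia (numero : Int) : Bool :=
  decide (potenciaLoop (numero : ℚ) numero.natAbs = 1)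

-- the 'while len(lista) > 0' loop of array_pos; the fuel bounds the iterations
-- (each iteration drops nsalto = 2*salto ≥ 2 elements for the salto ≥ 1 calls
-- array_general makes, so fuel lista.length + 1 is enough)
def arrayPosLoop (salto nsalto : Int) (vacios : List String) :
    Nat → List String → List String → List String
  | 0, _, temp => temp
  | f + 1, l, temp =>
    if l.length > 0 then
      arrayPosLoop salto nsalto vacios f (PySem.List.slice l (some nsalto) none)
        (temp ++ PySem.List.slice l none (some salto) ++ vacios)
    else temp

def array_pos (lista : List String) (salto : Int) : List String :=
  let tamaino := lista.length
  let l2 := PySem.List.slice lista (some (salto - 1)) none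
  let temp := List.replicate (salto - 1).toNat "?"   -- "?" * (salto-1), char by char
  let vacios := List.replicate salto.toNat "?"       -- "?" * salto
  let nsalto := salto * 2
  (arrayPosLoop salto nsalto vacios (l2.length + 1) l2 temp).take tamaino

def array_general (lista : List String) : List (List String) :=
  let tamaino : Int := lista.length
  let general := [PySem.List.slice lista none none]   -- lista[:]
  (PySem.List.pyRange 1 tamaino 1).foldl
    (fun g i => if potencia i then g ++ [array_pos lista i] else g) general

-- ===== PORT B =====
def maskRow (lista : List String) (s : Nat) : List String :=
  (PySem.List.enumerate lista).map
    (fun p => if PySem.Int.band (p.1 + 1) (s : Int) ≠ 0 then p.2 else "?")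

def altRows (lista : List String) (n s : Nat) (hs : 0 < s) : List (List String) :=
  if h : s < n then maskRow lista s :: altRows lista n (s * 2) (by omega) else []
termination_by n - s
decreasing_by omega

def array_general_alt (lista : List String) : List (List String) :=
  lista :: altRows lista lista.length 1 (by omega)

-- ===== PRECONDITION & SPEC =====
def Spec_array_general (lista : List String) (out : List (List String)) : Prop := out = array_general_alt lista
instance (lista : List String) (out : List (List String)) : Decidable (Spec_array_general lista out) := by unfold Spec_array_general; infer_instance

-- ===== CLAIM (what is proved, stated in full; the proofs are below) =====
def Claim_equal_array_general : Prop := ∀ (lista : List String), Dom_array_general lista → Spec_array_general lista (array_general lista)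

-- ===== LEMMAS AND PROOFS =====

-- the list of parity steps B walks through: s, 2s, 4s, … below n
def powersFrom (n s : Nat) (hs : 0 < s) : List Nat :=
  if h : s < n then s :: powersFrom n (s * 2) (by omega) else []
termination_by n - s
decreasing_by omega

-- potencia characterisation
lemma potenciaLoop_eq_one_iff (f : Nat) (q : ℚ) (hq : 0 < q) (hle : q ≤ 2 ^ f) :
    potenciaLoop q f = 1 ↔ ∃ e : Nat, q = 2 ^ e := by
  induction f generalizing q with
  | zero =>
    simp only [potenciaLoop]
    constructor
    · rintro rfl; exact ⟨0, by norm_num⟩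
    · rintro ⟨e, rfl⟩
      have : (2:ℚ) ^ e ≤ 1 := by simpa using hle
      have h1 : (1:ℚ) ≤ 2 ^ e := one_le_pow₀ (by norm_num)
      linarith
  | succ f ih =>
    simp only [potenciaLoop]
    by_cases h : q > 1
    · simp only [if_pos h]
      rw [ih (q / 2) (by positivity) (by rw [pow_succ] at hle; linarith)]
      constructor
      · rintro ⟨e, he⟩
        exact ⟨e + 1, by rw [pow_succ]; field_simp at he ⊢; linarith⟩
      · rintro ⟨e, rfl⟩
        rcases e with _ | e
        · norm_num at h
        · exact ⟨e, by rw [pow_succ]; ring⟩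
    · simp only [if_neg h]
      rw [not_lt] at h
      constructor
      · rintro rfl; exact ⟨0, by norm_num⟩
      · rintro ⟨e, rfl⟩
        have h1 : (1:ℚ) ≤ 2 ^ e := one_le_pow₀ (by norm_num)
        linarith

lemma potencia_iff (i : Int) (hi : 1 ≤ i) :
    potencia i = true ↔ ∃ e : Nat, i = 2 ^ e := by
  have hfuel : (i : ℚ) ≤ 2 ^ i.natAbs := by
    have h1 : i.natAbs ≤ 2 ^ i.natAbs := (Nat.lt_two_pow_self).le
    have h2 : (i : ℚ) = (i.natAbs : ℚ) := by
      rw [Nat.cast_natAbs]; rw [abs_of_nonneg (by exact_mod_cast hi.trans' (by norm_num))]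
    rw [h2]; exact_mod_cast h1
  rw [potencia, decide_eq_true_iff,
    potenciaLoop_eq_one_iff _ _ (by exact_mod_cast lt_of_lt_of_le one_pos hi) hfuel]
  constructor
  · rintro ⟨e, he⟩; exact ⟨e, by exact_mod_cast he⟩
  · rintro ⟨e, rfl⟩; exact ⟨e, by push_cast; ring⟩

lemma arrayPosLoop_acc (salto nsalto : Int) (v : List String) :
    ∀ (f : Nat) (l temp : List String),
      arrayPosLoop salto nsalto v f l temp = temp ++ arrayPosLoop salto nsalto v f l [] := by
  intro f
  induction f with
  | zero => intro l temp; simp [arrayPosLoop]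
  | succ f ih =>
    intro l temp
    simp only [arrayPosLoop]
    by_cases h : l.length > 0
    · simp only [if_pos h]
      rw [ih _ (temp ++ _ ++ _), ih _ ([] ++ _ ++ _)]
      simp
    · simp [if_neg h]

lemma arrayPosLoop_getElem (s : Nat) (hs : 0 < s) :
    ∀ (f : Nat) (l : List String) (j : Nat), l.length < f → (hj : j < l.length) →
      (arrayPosLoop (s : Int) ((s : Int) * 2) (List.replicate s "?") f l [])[j]? =
        some (if j % (s * 2) < s then l[j] else "?") := by
  intro f
  induction f with
  | zero => omega
  | succ f ih =>
    intro l j hf hj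
    have hl : l.length > 0 := by omega
    simp only [arrayPosLoop, if_pos hl]
    rw [arrayPosLoop_acc]
    have hslice1 : PySem.List.slice l none (some ((s : Nat) : Int)) = l.take s :=
      PySem.List.slice_to_natCast l s
    have hcast : ((s : Int) * 2) = (((s * 2 : Nat)) : Int) := by push_cast; ring
    have hslice2 : PySem.List.slice l (some ((s : Int) * 2)) none = l.drop (s * 2) := by
      rw [hcast]; exact PySem.List.slice_from_natCast l (s * 2)
    rw [hslice1, hslice2]
    simp only [List.nil_append]
    set P := l.take s ++ List.replicate s "?" with hP
    have hPlen : P.length = min s l.length + s := by simp [hP]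
    by_cases c1 : j < s
    · have hjP : j < P.length := by omega
      rw [List.getElem?_append_left hjP]
      have : j < (l.take s).length := by simp; omega
      rw [List.getElem?_append_left this]
      rw [List.getElem?_take_of_lt c1]
      rw [if_pos (by rw [Nat.mod_eq_of_lt (by omega)]; omega)]
      simp [List.getElem?_eq_getElem hj]
    · by_cases c2 : j < s * 2
      · have hmin : min s l.length = s := by omega
        have hjP : j < P.length := by omega
        rw [List.getElem?_append_left hjP]
        have h1 : (l.take s).length ≤ j := by simp; omega
        rw [List.getElem?_append_right h1]
        have : j - (l.take s).length < s := by simp; omega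
        rw [List.getElem?_replicate_of_lt this]
        rw [if_neg (by rw [Nat.mod_eq_of_lt (by omega)]; omega)]
      · have hmin : min s l.length = s := by omega
        have hjP : P.length ≤ j := by omega
        rw [List.getElem?_append_right hjP]
        have hdlen : (l.drop (s * 2)).length = l.length - s * 2 := by simp
        have hrec := ih (l.drop (s * 2)) (j - P.length) (by omega) (by omega)
        rw [hrec]
        have hPl : P.length = s * 2 := by omega
        have hmod : (j - P.length) % (s * 2) = j % (s * 2) := by
          rw [hPl]
          conv_rhs => rw [show j = (j - s * 2) + s * 2 by omega]
          rw [Nat.add_mod_right]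
        rw [hmod]
        by_cases hc : j % (s * 2) < s
        · rw [if_pos hc, if_pos hc]
          congr 1
          rw [List.getElem_drop]
          congr 1
          omega
        · rw [if_neg hc, if_neg hc]

-- (i+1) & 2^e ≠ 0  ↔  the block rule keeps position i (s = 2^e)
lemma bit_test (e i : Nat) :
    ((i + 1) &&& 2 ^ e ≠ 0) ↔
      (2 ^ e ≤ i + 1 ∧ (i + 1 - 2 ^ e) % (2 ^ e * 2) < 2 ^ e) := by
  set s := 2 ^ e with hse
  have hs : 0 < s := by positivity
  set m := i + 1 with hm
  set q := m / (s * 2) with hq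
  set k := m % (s * 2) with hk
  clear_value q k
  have hdm : s * 2 * q + k = m := by rw [hq, hk]; exact Nat.div_add_mod m (s * 2)
  have hklt : k < s * 2 := by rw [hk]; exact Nat.mod_lt _ (by omega)
  have hkle : k ≤ m := by rw [hk]; exact Nat.mod_le _ _
  -- LHS ↔ m / s % 2 = 1 ↔ s ≤ k
  have hand : (m &&& s ≠ 0) ↔ m / s % 2 = 1 := by
    rw [hse, Nat.and_two_pow]
    rcases h : (m.testBit e) with _ | _
    · rw [Nat.testBit_eq_decide_div_mod_eq] at h
      simp_all
    · rw [Nat.testBit_eq_decide_div_mod_eq] at h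
      simp_all
  have hdiv : m / s = k / s + 2 * q := by
    have hmeq : m = k + s * (2 * q) := by rw [← hdm]; ring
    rw [hmeq, Nat.add_mul_div_left _ _ hs]
  have hks1 : k / s ≤ 1 := by
    have : k / s < 2 := (Nat.div_lt_iff_lt_mul hs).mpr (by omega)
    omega
  have hmod2 : m / s % 2 = k / s := by
    rw [hdiv, Nat.add_mul_mod_self_left, Nat.mod_eq_of_lt (by omega)]
  have hlhs : (m &&& s ≠ 0) ↔ s ≤ k := by
    rw [hand, hmod2]
    constructor
    · intro h
      have : 1 ≤ k / s := by omega
      calc s = 1 * s := (one_mul s).symm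
        _ ≤ k := (Nat.le_div_iff_mul_le hs).mp this
    · intro h
      have : 1 ≤ k / s := (Nat.le_div_iff_mul_le hs).mpr (by omega)
      omega
  rw [hlhs]
  constructor
  · intro hsk
    refine ⟨by omega, ?_⟩
    have h1 : m - s = s * 2 * q + (k - s) := by omega
    rw [h1, Nat.mul_add_mod, Nat.mod_eq_of_lt (by omega)]
    omega
  · rintro ⟨hsm, hmod⟩
    by_contra hks
    rw [Nat.not_le] at hks
    clear hq hk
    have hq1 : 1 ≤ q := by
      by_contra hq0
      have : q = 0 := by omega
      rw [this, Nat.mul_zero] at hdm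
      omega
    obtain ⟨q', rfl⟩ : ∃ q', q = q' + 1 := ⟨q - 1, by omega⟩
    have hT : s * 2 * (q' + 1) = s * 2 * q' + s * 2 := by ring
    rw [hT] at hdm
    have h1 : m - s = s * 2 * q' + (s + k) := by omega
    rw [h1, Nat.mul_add_mod, Nat.mod_eq_of_lt (by omega)] at hmod
    omega

lemma maskRow_length (lista : List String) (s : Nat) :
    (maskRow lista s).length = lista.length := by
  simp [maskRow, PySem.List.length_enumerate]

lemma maskRow_getElem? (lista : List String) (s i : Nat) (h : i < lista.length) :
    (maskRow lista s)[i]? = some (if (i + 1) &&& s ≠ 0 then lista[i] else "?") := by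
  simp only [maskRow, List.getElem?_map, PySem.List.getElem?_enumerate,
    List.getElem?_eq_getElem h, Option.map_some]
  congr 1
  have hc : ((0 : Int) + (i : Nat) + 1) = (((i + 1 : Nat)) : Int) := by push_cast; ring
  rw [hc, PySem.Int.band_natCast]
  by_cases hb : (i + 1) &&& s ≠ 0
  · rw [if_pos (by exact_mod_cast hb), if_pos hb]
  · rw [if_neg (by simp_all), if_neg hb]

lemma array_pos_eq_maskRow (lista : List String) (e : Nat) :
    array_pos lista ((2 ^ e : Nat) : Int) = maskRow lista (2 ^ e) := by
  set s := 2 ^ e with hse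
  have hs : 0 < s := by positivity
  set n := lista.length with hn
  -- unfold array_pos's lets
  have hc1 : ((s : Int) - 1) = (((s - 1 : Nat)) : Int) := by omega
  have hl2 : PySem.List.slice lista (some ((s : Int) - 1)) none = lista.drop (s - 1) := by
    rw [hc1]; exact PySem.List.slice_from_natCast lista (s - 1)
  have htn : ((s : Int) - 1).toNat = s - 1 := by omega
  have hvn : ((s : Int)).toNat = s := by omega
  set l2 := lista.drop (s - 1) with hl2d
  have hl2len : l2.length = n - (s - 1) := by simp [hl2d, hn]
  set core := arrayPosLoop (s : Int) ((s : Int) * 2) (List.replicate s "?") (l2.length + 1) l2 []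
    with hcore
  have hunf : array_pos lista ((s : Nat) : Int) =
      (List.replicate (s - 1) "?" ++ core).take n := by
    simp only [array_pos]
    rw [hl2, htn, hvn, arrayPosLoop_acc]
  -- core is at least as long as l2
  have hcorelen : l2.length ≤ core.length := by
    rcases Nat.eq_zero_or_pos l2.length with h0 | hpos
    · omega
    · have h := arrayPosLoop_getElem s hs (l2.length + 1) l2 (l2.length - 1) (by omega) (by omega)
      rw [← hcore] at h
      obtain ⟨hlt, -⟩ := List.getElem?_eq_some_iff.mp h
      omega
  rw [hunf]
  apply List.ext_getElem?
  intro i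
  rcases Nat.lt_or_ge i n with hi | hi
  · -- inside
    have hilt : i < (List.replicate (s - 1) "?" ++ core).length := by
      simp only [List.length_append, List.length_replicate]; omega
    rw [List.getElem?_take_of_lt hi, maskRow_getElem? lista s i (by omega)]
    rcases Nat.lt_or_ge i (s - 1) with hlo | hhi
    · rw [List.getElem?_append_left (by simp; omega), List.getElem?_replicate_of_lt hlo]
      rw [if_neg (by rw [hse] at hlo ⊢; rw [bit_test]; omega)]
    · rw [List.getElem?_append_right (by simp; omega)]
      have hjlt : i - (List.replicate (s - 1) "?").length < l2.length := by
        simp only [List.length_replicate]; omega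
      rw [arrayPosLoop_getElem s hs _ _ _ (by omega) hjlt]
      simp only [List.length_replicate] at hjlt ⊢
      have hbit := bit_test e i
      rw [← hse] at hbit
      have hcond : ((i + 1) &&& s ≠ 0) ↔ (i - (s - 1)) % (s * 2) < s := by
        rw [hbit]
        have : i + 1 - s = i - (s - 1) := by omega
        rw [this]
        omega
      by_cases hb : (i + 1) &&& s ≠ 0
      · rw [if_pos (hcond.mp hb), if_pos hb]
        congr 1
        rw [← Option.some_inj, ← List.getElem?_eq_getElem hjlt, hl2d, List.getElem?_drop,
          show s - 1 + (i - (s - 1)) = i from by omega, List.getElem?_eq_getElem (by omega)]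
      · rw [if_neg (by rw [← hcond] at *; simp_all), if_neg hb]
  · -- both out of range
    rw [List.getElem?_eq_none (by simp; omega),
      List.getElem?_eq_none (by rw [maskRow_length]; omega)]

lemma mem_powersFrom (n : Nat) : ∀ (s : Nat) (hs : 0 < s) (x : Nat),
    x ∈ powersFrom n s hs ↔ (∃ j : Nat, x = s * 2 ^ j) ∧ x < n := by
  intro s hs
  induction s, hs using powersFrom.induct n with
  | case1 s hs h ih =>
    intro x
    rw [powersFrom, dif_pos h, List.mem_cons, ih]
    constructor
    · rintro (rfl | ⟨⟨j, rfl⟩, hlt⟩)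
      · exact ⟨⟨0, by ring⟩, h⟩
      · exact ⟨⟨j + 1, by ring⟩, hlt⟩
    · rintro ⟨⟨j, rfl⟩, hlt⟩
      rcases j with _ | j
      · left; ring
      · right
        exact ⟨⟨j, by ring⟩, hlt⟩
  | case2 s hs h =>
    intro x
    rw [powersFrom, dif_neg h]
    simp only [List.not_mem_nil, false_iff]
    rintro ⟨⟨j, rfl⟩, hlt⟩
    have : s ≤ s * 2 ^ j := Nat.le_mul_of_pos_right s (by positivity)
    omega

lemma pairwise_powersFrom (n : Nat) : ∀ (s : Nat) (hs : 0 < s),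
    (powersFrom n s hs).Pairwise (· < ·) := by
  intro s hs
  induction s, hs using powersFrom.induct n with
  | case1 s hs h ih =>
    rw [powersFrom, dif_pos h]
    refine List.pairwise_cons.mpr ⟨?_, ih⟩
    intro x hx
    obtain ⟨⟨j, rfl⟩, -⟩ := (mem_powersFrom n _ (by omega) x).mp hx
    have : s * 2 ≤ s * 2 * 2 ^ j := Nat.le_mul_of_pos_right _ (by positivity)
    omega
  | case2 s hs h =>
    rw [powersFrom, dif_neg h]
    exact List.Pairwise.nil

lemma altRows_eq_map (lista : List String) (n : Nat) : ∀ (s : Nat) (hs : 0 < s),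
    altRows lista n s hs = (powersFrom n s hs).map (maskRow lista) := by
  intro s hs
  induction s, hs using powersFrom.induct n with
  | case1 s hs h ih => rw [altRows, powersFrom, dif_pos h, dif_pos h, List.map_cons, ih]
  | case2 s hs h => rw [altRows, powersFrom, dif_neg h, dif_neg h, List.map_nil]

lemma filter_potencia_eq (n : Nat) :
    (PySem.List.pyRange 1 (n : Int) 1).filter (fun i => potencia i) =
      (powersFrom n 1 one_pos).map (fun (s : Nat) => ((s : Nat) : Int)) := by
  have hs1 : (List.filter (fun i => potencia i) (PySem.List.pyRange 1 (n : Int) 1)).Pairwise (· < ·) :=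
    (PySem.List.pairwise_lt_pyRange_one 1 n).filter _
  have hs2 : ((powersFrom n 1 one_pos).map (fun (s : Nat) => ((s : Nat) : Int))).Pairwise (· < ·) := by
    refine (pairwise_powersFrom n 1 one_pos).map _ ?_
    intro a b hab
    exact_mod_cast hab
  have hperm : (List.filter (fun i => potencia i) (PySem.List.pyRange 1 (n : Int) 1)).Perm
      ((powersFrom n 1 one_pos).map (fun (s : Nat) => ((s : Nat) : Int))) := by
    rw [List.perm_ext_iff_of_nodup (hs1.imp ne_of_lt) (hs2.imp ne_of_lt)]
    intro x
    rw [List.mem_filter, PySem.List.mem_pyRange_one, List.mem_map]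
    constructor
    · rintro ⟨⟨h1, h2⟩, hp⟩
      obtain ⟨e, rfl⟩ := (potencia_iff x h1).mp hp
      refine ⟨2 ^ e, (mem_powersFrom n 1 one_pos _).mpr ⟨⟨e, by ring⟩, by exact_mod_cast h2⟩, ?_⟩
      push_cast
      ring
    · rintro ⟨a, ha, rfl⟩
      obtain ⟨⟨j, rfl⟩, hlt⟩ := (mem_powersFrom n 1 one_pos a).mp ha
      have h1 : (1 : Int) ≤ ((1 * 2 ^ j : Nat) : Int) := by
        have : (1 : Nat) ≤ 1 * 2 ^ j := by simpa using Nat.one_le_two_pow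
        exact_mod_cast this
      refine ⟨⟨h1, by exact_mod_cast hlt⟩, ?_⟩
      rw [potencia_iff _ h1]
      exact ⟨j, by push_cast; ring⟩
  exact hperm.eq_of_pairwise (fun a b _ _ h1 h2 => le_antisymm h1 h2)
    (hs1.imp le_of_lt) (hs2.imp le_of_lt)

-- ===== VERDICT (by name: the statement is the Claim_ definition above) =====
theorem array_general_spec : Claim_equal_array_general := by
  intro lista _
  unfold Spec_array_general
  simp only [array_general, PySem.List.slice_none_none]
  rw [PySem.List.foldl_append_if (fun i => potencia i) (fun i => array_pos lista i)]
  rw [filter_potencia_eq lista.length, List.map_map]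
  rw [List.map_congr_left (fun s hs => ?_), array_general_alt,
    altRows_eq_map lista lista.length 1 one_pos, List.singleton_append]
  obtain ⟨⟨j, rfl⟩, -⟩ := (mem_powersFrom lista.length 1 one_pos s).mp hs
  simp only [Function.comp_apply]
  have h1 : (1 * 2 ^ j : Nat) = 2 ^ j := by ring
  rw [h1]
  exact array_pos_eq_maskRow lista j
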